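-- pv_equiv track=rewrite | github.com/EleutherAI/lm-evaluation-harness | lm_eval/utils.py | _build_hierarchy_info
-- ===== SOURCE A (Python) =====
-- def _build_hierarchy_info(
--     group_subtasks: dict[str, list[str]], available_keys: set[str]
-- ) -> tuple[dict[str, int], list[str]]:
--     """Build depth map and hierarchical key ordering from group_subtasks.
--
--     Uses a tree-walk approach over group_subtasks for ordering.
--
--     Returns:
--         (depth_map, ordered_keys) — depths for indentation, keys in display order
--     """
--     depth_map: dict[str, int] = {}
--     ordered: list[str] = []
--
--     def visit(name: str, depth: int):
--         depth_map[name] = depth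
--         if name in available_keys:
--             ordered.append(name)
--         for child in sorted(group_subtasks.get(name, [])):
--             visit(child, depth + 1)
--
--     all_children = {c for children in group_subtasks.values() for c in children}
--     for name in sorted(group_subtasks):
--         if name not in all_children:
--             visit(name, 0)
--
--     # Add remaining keys not in any hierarchy (sorted for determinism)
--     for key in sorted(available_keys):
--         if key not in depth_map:
--             ordered.append(key)
--
--     return depth_map, ordered
-- ===== SOURCE B (Python) =====
-- def _build_hierarchy_info(
--     group_subtasks: dict[str, list[str]], available_keys: set[str]
-- ) -> tuple[dict[str, int], list[str]]:
--     """Iterative (explicit-stack) variant: same depth map and ordering as the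
--     recursive tree walk, without Python recursion."""
--     depth_map: dict[str, int] = {}
--     ordered: list[str] = []
--
--     all_children = {c for children in group_subtasks.values() for c in children}
--     roots = [name for name in sorted(group_subtasks) if name not in all_children]
--
--     stack = [(r, 0) for r in reversed(roots)]
--     while stack:
--         name, depth = stack.pop()
--         depth_map[name] = depth
--         if name in available_keys:
--             ordered.append(name)
--         for child in reversed(sorted(group_subtasks.get(name, []))):
--             stack.append((child, depth + 1))
--
--     for key in sorted(available_keys):
--         if key not in depth_map:
--             ordered.append(key)
--
--     return depth_map, ordered
-- ===== Notes on version B (the rewrite author's own statement) =====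
-- stated objective: alternative
-- what changed: A's recursive nested `visit` helper is replaced by an explicit-stack iterative DFS (pop a (name, depth) pair, push sorted children reversed); roots and the trailing remaining-keys loop are computed the same way.
import Mathlib
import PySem

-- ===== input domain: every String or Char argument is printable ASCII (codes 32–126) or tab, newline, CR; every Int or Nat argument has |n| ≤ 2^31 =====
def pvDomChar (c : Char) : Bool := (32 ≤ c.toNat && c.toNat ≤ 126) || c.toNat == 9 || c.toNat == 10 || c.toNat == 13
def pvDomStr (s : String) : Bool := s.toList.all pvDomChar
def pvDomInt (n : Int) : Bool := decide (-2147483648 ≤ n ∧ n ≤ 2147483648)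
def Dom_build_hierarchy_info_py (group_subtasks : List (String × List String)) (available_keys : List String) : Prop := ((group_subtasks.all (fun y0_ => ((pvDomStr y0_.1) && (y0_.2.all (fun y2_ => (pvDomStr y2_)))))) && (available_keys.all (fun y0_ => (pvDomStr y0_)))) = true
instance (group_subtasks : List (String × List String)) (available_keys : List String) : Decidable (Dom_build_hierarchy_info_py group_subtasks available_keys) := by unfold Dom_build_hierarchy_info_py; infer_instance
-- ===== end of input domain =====

-- B replaces A's recursive `visit` helper by an explicit-stack iterative DFS (alternative
-- decomposition, same cost). Both ports bound the DFS depth by a fuel of `len(group_subtasks)+1`,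
-- which is never exhausted on the acyclic inputs Pre_ admits.

-- ===== PORT A =====
-- termination helper for pvRunB (cited in its decreasing_by)
theorem pvGetD_len_le (d : PySem.Dict String (List String)) (name : String) :
    (d.getD name []).length ≤ (d.values.map List.length).sum := by
  rw [PySem.Dict.getD_eq_get?_getD]
  cases h : d.get? name with
  | none => simp
  | some v =>
    simp only [Option.getD_some]
    have hv : v ∈ d.values := by
      have := PySem.Dict.mem_items_of_get?_eq_some d h
      simp only [PySem.Dict.values]
      exact List.mem_map_of_mem this
    exact List.le_sum_of_mem (List.mem_map_of_mem hv)

-- A's recursive helper `visit`; the Nat argument is a depth fuel (a pure totality guard: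
-- on inputs satisfying Pre_ below the fuel is never exhausted, so the port is A's code).
def pvVisitA (d : PySem.Dict String (List String)) (avail : List String) :
    Nat → String → Int → PySem.Dict String Int × List String → PySem.Dict String Int × List String
  | 0, _, _, st => st
  | f + 1, name, depth, st =>
      let dm := st.1.insert name depth
      let ord := if avail.contains name then st.2 ++ [name] else st.2
      (PySem.List.sorted (d.getD name []) (fun x => x) false).foldl
        (fun st c => pvVisitA d avail f c (depth + 1) st) (dm, ord)

def build_hierarchy_info_py (group_subtasks : List (String × List String)) (available_keys : List String) : (List (String × Int)) × List String :=
  let d := PySem.Dict.ofList group_subtasks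
  let all_children : PySem.Set String := PySem.Set.ofList d.values.flatten
  let st :=
    (PySem.List.sorted d.keys (fun x => x) false).foldl
      (fun st name =>
        if all_children.contains name then st
        else pvVisitA d available_keys (group_subtasks.length + 1) name 0 st)
      (PySem.Dict.empty, [])
  let ordered :=
    (PySem.List.sorted available_keys (fun x => x) false).foldl
      (fun ord key => if st.1.contains key then ord else ord ++ [key]) st.2
  (st.1.items, ordered)

-- ===== PORT B =====
-- B's `while stack:` loop; the stack is kept top-first (Python's list.pop()/extend(reversed(…))
-- become head removal / head prepend). Each entry carries a depth fuel (entry at depth k holds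
-- fuel F-k, F the initial fuel) — a pure totality guard, never exhausted on Pre_ inputs.
def pvRunB (d : PySem.Dict String (List String)) (avail : List String) :
    List (String × Int × Nat) → PySem.Dict String Int × List String → PySem.Dict String Int × List String
  | [], st => st
  | (_, _, 0) :: rest, st => pvRunB d avail rest st
  | (name, depth, f + 1) :: rest, st =>
      let dm := st.1.insert name depth
      let ord := if avail.contains name then st.2 ++ [name] else st.2
      pvRunB d avail
        (((PySem.List.sorted (d.getD name []) (fun x => x) false).map (fun c => (c, depth + 1, f))) ++ rest)
        (dm, ord)
  termination_by stack _ => (stack.map (fun e => ((d.values.map List.length).sum + 1) ^ e.2.2)).sum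
  decreasing_by
    · simp
    · simp only [List.map_append, List.sum_append, List.map_map, List.map_cons, List.sum_cons, Nat.succ_eq_add_one]
      have hlen : (PySem.List.sorted (d.getD name []) (fun x => x) false).length ≤ (d.values.map List.length).sum :=
        le_of_eq_of_le (PySem.List.length_sorted _ _ _) (pvGetD_len_le d name)
      have h1 : ∀ (L : List String) (X : ℕ), (L.map ((fun e : String × ℤ × ℕ => X ^ e.2.2) ∘ fun c => (c, depth + 1, f))).sum = L.length * X ^ f := by
        intro L X
        simp [Function.comp_def, List.map_const', List.sum_replicate]
      rw [h1]
      have h2 : (PySem.List.sorted (d.getD name []) (fun x => x) false).length * ((d.values.map List.length).sum + 1) ^ f < ((d.values.map List.length).sum + 1) ^ (f + 1) := by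
        calc (PySem.List.sorted (d.getD name []) (fun x => x) false).length * ((d.values.map List.length).sum + 1) ^ f
            ≤ (d.values.map List.length).sum * ((d.values.map List.length).sum + 1) ^ f := Nat.mul_le_mul_right _ hlen
        _ < ((d.values.map List.length).sum + 1) * ((d.values.map List.length).sum + 1) ^ f :=
            Nat.mul_lt_mul_of_lt_of_le (Nat.lt_succ_self _) (le_refl _) (Nat.pow_pos (Nat.succ_pos _))
        _ = ((d.values.map List.length).sum + 1) ^ (f + 1) := by ring
      omega

def build_hierarchy_info_py_alt (group_subtasks : List (String × List String)) (available_keys : List String) : (List (String × Int)) × List String :=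
  let d := PySem.Dict.ofList group_subtasks
  let all_children : PySem.Set String := PySem.Set.ofList d.values.flatten
  let roots := (PySem.List.sorted d.keys (fun x => x) false).filter (fun name => !all_children.contains name)
  let st := pvRunB d available_keys (roots.map (fun r => (r, (0 : Int), group_subtasks.length + 1))) (PySem.Dict.empty, [])
  let ordered :=
    (PySem.List.sorted available_keys (fun x => x) false).foldl
      (fun ord key => if st.1.contains key then ord else ord ++ [key]) st.2
  (st.1.items, ordered)

-- ===== PRECONDITION & SPEC =====
-- helpers for Pre_: n-step closure of the children relation
def pvAdj (d : PySem.Dict String (List String)) (x : String) : List String := d.getD x []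
def pvClosure (d : PySem.Dict String (List String)) : Nat → PySem.Set String → PySem.Set String
  | 0, s => s
  | n + 1, s => pvClosure d n (PySem.Set.update s (s.flatMap (pvAdj d)))

-- Pre_ excludes exactly the inputs on which a cycle of the children relation is reachable from a
-- root: there Python A raises RecursionError (and B's while-loop does not terminate).
def Pre_build_hierarchy_info_py (group_subtasks : List (String × List String)) (available_keys : List String) : Prop :=
  let d := PySem.Dict.ofList group_subtasks
  let n := group_subtasks.length + 1
  let all_children : PySem.Set String := PySem.Set.ofList d.values.flatten
  let roots := d.keys.filter (fun k => !all_children.contains k)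
  let reach := pvClosure d n (PySem.Set.ofList roots)
  ∀ k ∈ reach, k ∉ pvClosure d n (PySem.Set.ofList (pvAdj d k))
instance (group_subtasks : List (String × List String)) (available_keys : List String) : Decidable (Pre_build_hierarchy_info_py group_subtasks available_keys) := by unfold Pre_build_hierarchy_info_py; infer_instance

def pvWitness_build_hierarchy_info_py : (List (String × List String)) × List String :=
  ([("a", ["b", "c"]), ("c", ["d"])], ["b", "c", "e"])

def Spec_build_hierarchy_info_py (group_subtasks : List (String × List String)) (available_keys : List String) (out : (List (String × Int)) × List String) : Prop := out = build_hierarchy_info_py_alt group_subtasks available_keys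
instance (group_subtasks : List (String × List String)) (available_keys : List String) (out : (List (String × Int)) × List String) : Decidable (Spec_build_hierarchy_info_py group_subtasks available_keys out) := by unfold Spec_build_hierarchy_info_py; infer_instance

-- ===== CLAIM (what is proved, stated in full; the proofs are below) =====
def Claim_equal_build_hierarchy_info_py : Prop := ∀ (group_subtasks : List (String × List String)) (available_keys : List String), Dom_build_hierarchy_info_py group_subtasks available_keys → Pre_build_hierarchy_info_py group_subtasks available_keys → Spec_build_hierarchy_info_py group_subtasks available_keys (build_hierarchy_info_py group_subtasks available_keys)

-- ===== LEMMAS AND PROOFS =====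

-- the stack run of B is the fold of A's recursive visit over the stack entries
theorem pvRunB_eq (d : PySem.Dict String (List String)) (avail : List String)
    (stack : List (String × Int × Nat)) (st : PySem.Dict String Int × List String) :
    pvRunB d avail stack st = stack.foldl (fun st e => pvVisitA d avail e.2.2 e.1 e.2.1 st) st := by
  fun_induction pvRunB d avail stack st with
  | case1 st => rfl
  | case2 n dep rest st ih => simpa [pvVisitA] using ih
  | case3 name dep f rest st dm ord ih =>
      simp only [List.foldl_cons]
      rw [ih, List.foldl_append, List.foldl_map]
      rfl

-- A's root loop (skip-if-child) is the fold of visit over the filtered, mapped root stack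
theorem pvFold_if_filter (d : PySem.Dict String (List String)) (avail : List String) (F : Nat)
    (keys : List String) (p : String → Bool) (init : PySem.Dict String Int × List String) :
    keys.foldl (fun st n => if p n then st else pvVisitA d avail F n 0 st) init
      = ((keys.filter (fun n => !p n)).map (fun r => (r, (0 : Int), F))).foldl
          (fun st e => pvVisitA d avail e.2.2 e.1 e.2.1 st) init := by
  rw [List.foldl_map, ← PySem.List.foldl_if_eq_foldl_filter]
  apply PySem.List.foldl_congr_mem
  intro acc x _
  cases hp : p x <;> simp_all

theorem ports_agree (group_subtasks : List (String × List String)) (available_keys : List String) :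
    build_hierarchy_info_py group_subtasks available_keys = build_hierarchy_info_py_alt group_subtasks available_keys := by
  simp only [build_hierarchy_info_py, build_hierarchy_info_py_alt]
  rw [pvRunB_eq, pvFold_if_filter]

-- ===== VERDICT (by name: the statement is the Claim_ definition above) =====
theorem build_hierarchy_info_py_spec : Claim_equal_build_hierarchy_info_py := by
  intro gs av _ _
  unfold Spec_build_hierarchy_info_py
  exact ports_agree gs av
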